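-- pv_equiv track=rewrite | github.com/IAidenI/CTF_WriteUps | 404CTF 2023/Programation/Difficile - Des mots, des mots, des mots.py | regle_3
-- ===== SOURCE A (Python) =====
-- import math
--
-- def regle_1(val_r1):
--     return ''.join(reversed([val_r1[i:i + 1] for i in range(0, len(val_r1), 1)]))
--
-- def regle_2(val):
--     val_r2 = regle_1(val)
--
--     if len(val_r2) % 2 == 0:
--         indice = int(len(val_r2) / 2)
--         part_1 = val_r2[0:indice]
--         part_2 = val_r2[indice:len(val_r2)]
--         val_r2 = part_2 + part_1
--         return val_r2
--     else:
--         indice = math.floor(len(val_r2) / 2)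
--         char = val_r2[indice]
--         return val_r2.replace(char, "")
--
-- def regle_3(val_r3):
--     if len(val_r3) >= 3:
--         if val_r3[2] not in voyelle:
--             val_voyelle = ""
--             for i in range(len(val_r3)):
--                 if val_r3[i] not in voyelle:
--                     continue
--                 val_voyelle += val_r3[i]
--                 indice = val_r3.find(val_r3[i])
--                 val_r3 = val_r3[:indice] + "$" + val_r3[indice + 1:]
--
--             val_voyelle = val_voyelle[1:] + val_voyelle[:1]
--             for char in val_voyelle:
--                 indice = val_r3.find('$')
--                 val_r3 = val_r3[:indice] + char + val_r3[indice + 1:]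
--
--             return regle_2(val_r3)
--         else:
--             val_voyelle = ""
--             for i in range(len(val_r3)):
--                 if val_r3[i] not in voyelle:
--                     continue
--                 val_voyelle += val_r3[i]
--                 indice = val_r3.find(val_r3[i])
--                 val_r3 = val_r3[:indice] + "$" + val_r3[indice + 1:]
--
--             val_voyelle = val_voyelle[-1:] + val_voyelle[:-1]
--             for char in val_voyelle:
--                 indice = val_r3.find('$')
--                 val_r3 = val_r3[:indice] + char + val_r3[indice + 1:]
--
--             return regle_2(val_r3)
--     else:
--         return val_r3
--
-- voyelle = ['a', 'e', 'i', 'o', 'u', 'y']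
-- ===== SOURCE B (Python) =====
-- def regle_3(val_r3):
--     # Rotate the string's vowels one step (direction chosen by the third character)
--     # in a single pass, then reverse and swap/strip the halves as regle_2 does.
--     if len(val_r3) < 3:
--         return val_r3
--     voy = "aeiouy"
--     vowels = [c for c in val_r3 if c in voy]
--     if val_r3[2] in voy:
--         rot = vowels[-1:] + vowels[:-1]
--     else:
--         rot = vowels[1:] + vowels[:1]
--     it = iter(rot)
--     t = ''.join(next(it) if c in voy else c for c in val_r3)[::-1]
--     n = len(t)
--     if n % 2 == 0:
--         return t[n // 2:] + t[:n // 2]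
--     return t.replace(t[n // 2], "")
-- ===== Notes on version B (the rewrite author's own statement) =====
-- stated objective: faster
-- what changed: A repeatedly rebuilds the string with find/slice (marking every vowel with a '$' placeholder, then refilling the placeholders one find at a time) and reverses via a per-character slice list; B collects the vowels in one pass, rotates the list once, and writes the rotated vowels back into the vowel positions in a second single pass. Pre_ excludes strings containing the character '$', which A uses internally as a placeholder during vowel rotation, so pre-existing '$' characters collide with the placeholder; the task's natural inputs (words) never contain it.
-- outside the precondition, e.g. on regle_3('$ab'): A returns 'ba', B returns 'b$'; on regle_3('$'): A returns '$', B returns '$'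
import Mathlib
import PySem

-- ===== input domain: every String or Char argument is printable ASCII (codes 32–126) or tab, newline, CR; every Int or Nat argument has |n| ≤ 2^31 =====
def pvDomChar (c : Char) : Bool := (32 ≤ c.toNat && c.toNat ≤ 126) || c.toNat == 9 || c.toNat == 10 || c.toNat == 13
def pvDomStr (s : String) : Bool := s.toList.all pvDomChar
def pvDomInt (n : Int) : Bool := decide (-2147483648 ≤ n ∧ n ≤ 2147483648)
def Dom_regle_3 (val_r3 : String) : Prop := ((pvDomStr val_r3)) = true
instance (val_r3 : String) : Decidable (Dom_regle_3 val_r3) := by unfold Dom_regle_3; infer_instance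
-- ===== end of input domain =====

-- B rotates the vowels in one pass and writes them back into the vowel positions (O(n))
-- instead of A's repeated find/rebuild passes (O(n^2)); same return value on Pre_.

-- ===== PORT A =====

-- voyelle = ['a', 'e', 'i', 'o', 'u', 'y']  (a list of 1-character strings; ported as Char)
def pvVoyelle : List Char := ['a', 'e', 'i', 'o', 'u', 'y']

-- ''.join(reversed([val_r1[i:i + 1] for i in range(0, len(val_r1), 1)]))
def regle_1 (val_r1 : String) : String :=
  PySem.Str.join "" (((PySem.List.pyRange 0 (PySem.Str.len val_r1) 1).map
    (fun i => PySem.Str.slice val_r1 (some i) (some (i + 1)))).reverse)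

def regle_2 (val : String) : String :=
  let val_r2 := regle_1 val
  if PySem.Int.mod (PySem.Str.len val_r2) 2 == 0 then
    -- indice = int(len(val_r2) / 2): float halving of an even length = floor division (exact)
    let indice := PySem.Int.floordiv (PySem.Str.len val_r2) 2
    let part_1 := PySem.Str.slice val_r2 (some 0) (some indice)
    let part_2 := PySem.Str.slice val_r2 (some indice) (some (PySem.Str.len val_r2))
    part_2 ++ part_1
  else
    -- indice = math.floor(len(val_r2) / 2)
    let indice := PySem.Int.floordiv (PySem.Str.len val_r2) 2
    let char := (PySem.Str.pyGet? val_r2 indice).getD ' '  -- always in range: 0 ≤ indice < odd length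
    PySem.Str.replace val_r2 (String.ofList [char]) ""

-- the first for-loop of regle_3 (textually identical in A's two branches):
-- walks i over range(len(val_r3)), appends each vowel to val_voyelle and overwrites
-- its first occurrence (find) with '$'
def pvExtract (val0 : String) : String × String :=
  (PySem.List.pyRange 0 (PySem.Str.len val0) 1).foldl
    (fun st i =>
      match PySem.Str.pyGet? st.1 i with
      | none => st  -- i is always in range (the length never changes)
      | some c =>
        if c ∉ pvVoyelle then st  -- continue
        else
          let indice := PySem.Str.find st.1 (String.ofList [c])
          (PySem.Str.slice st.1 none (some indice) ++ "$" ++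
             PySem.Str.slice st.1 (some (indice + 1)) none,
           st.2 ++ String.ofList [c]))
    (val0, "")

-- the second for-loop (textually identical in A's two branches):
-- for char in val_voyelle: overwrite the first '$' (find) with char
def pvReinsert (val : String) (vv : String) : String :=
  vv.toList.foldl
    (fun v ch =>
      let indice := PySem.Str.find v "$"
      PySem.Str.slice v none (some indice) ++ String.ofList [ch] ++
        PySem.Str.slice v (some (indice + 1)) none)
    val

def regle_3 (val_r3 : String) : String :=
  if PySem.Str.len val_r3 ≥ 3 then
    if ((PySem.Str.pyGet? val_r3 2).getD ' ') ∉ pvVoyelle then  -- index 2 always in range here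
      let st := pvExtract val_r3
      let vv := PySem.Str.slice st.2 (some 1) none ++ PySem.Str.slice st.2 none (some 1)
      regle_2 (pvReinsert st.1 vv)
    else
      let st := pvExtract val_r3
      let vv := PySem.Str.slice st.2 (some (-1)) none ++ PySem.Str.slice st.2 none (some (-1))
      regle_2 (pvReinsert st.1 vv)
  else val_r3

-- ===== PORT B =====

-- B's fill pass: ''.join(next(it) if c in voy else c for c in val_r3) —
-- each vowel position takes the next rotated vowel, every other character is kept.
def pvFillB (s : List Char) (q : List Char) : List Char :=
  match s, q with
  | [], _ => []
  | c :: s', q =>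
    if c ∈ pvVoyelle then
      match q with
      | x :: q' => x :: pvFillB s' q'
      | [] => c :: pvFillB s' []  -- unreachable: rot has exactly one entry per vowel
    else c :: pvFillB s' q

def regle_3_alt (val_r3 : String) : String :=
  let s := val_r3.toList
  if s.length < 3 then val_r3
  else
    let vowels := s.filter (fun c => c ∈ pvVoyelle)
    let rot :=
      if s[2]?.getD ' ' ∈ pvVoyelle then  -- index 2 in range: length ≥ 3
        PySem.List.slice vowels (some (-1)) none ++ PySem.List.slice vowels none (some (-1))
      else
        PySem.List.slice vowels (some 1) none ++ PySem.List.slice vowels none (some 1)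
    let t := (pvFillB s rot).reverse  -- ''.join(…)[::-1]
    let n := t.length
    if n % 2 == 0 then
      String.ofList (t.drop (n / 2) ++ t.take (n / 2))
    else
      -- t.replace(t[n // 2], ""); index in range: n odd hence n / 2 < n
      PySem.Str.replace (String.ofList t) (String.ofList [t[n / 2]?.getD ' ']) ""

-- ===== PRECONDITION & SPEC =====

-- Pre_ excludes strings containing the character '$', which A uses internally as an
-- in-band placeholder during vowel rotation, so pre-existing '$' characters collide
-- with the placeholder; the task's natural inputs (words) never contain it.
def Pre_regle_3 (val_r3 : String) : Prop := '$' ∉ val_r3.toList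
instance (val_r3 : String) : Decidable (Pre_regle_3 val_r3) := by unfold Pre_regle_3; infer_instance

def pvWitness_regle_3 : String := "bonjour"

def Spec_regle_3 (val_r3 : String) (out : String) : Prop := out = regle_3_alt val_r3
instance (val_r3 : String) (out : String) : Decidable (Spec_regle_3 val_r3 out) := by
  unfold Spec_regle_3; infer_instance

-- ===== CLAIM =====

def Claim_equal_regle_3 : Prop :=
  ∀ (val_r3 : String), Dom_regle_3 val_r3 → Pre_regle_3 val_r3 → Spec_regle_3 val_r3 (regle_3 val_r3)

-- ===== LEMMAS AND PROOFS =====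

-- mark c: what A's first loop leaves at a position originally holding c
def pvMark (c : Char) : Char := if c ∈ pvVoyelle then '$' else c

-- A's slot fill at list level: the queue entry goes to every '$' or vowel position
-- (used only to characterise A; on Pre_ it coincides with B's pvFillB, see pv_fill_eq_fillB)
def pvFill (s : List Char) (queue : List Char) : List Char :=
  match s, queue with
  | [], _ => []
  | c :: s', q =>
    if c = '$' ∨ c ∈ pvVoyelle then
      match q with
      | x :: q' => x :: pvFill s' q'
      | [] => c :: pvFill s' []
    else c :: pvFill s' q

-- list-level version of A's reinsertion step (one '$' overwritten)
def pvRpl (u : List Char) (ch : Char) : List Char :=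
  let indice := PySem.Chars.find u ['$']
  PySem.List.slice u none (some indice) ++ [ch] ++ PySem.List.slice u (some (indice + 1)) none

-- [c] is a prefix iff the head is c
lemma pv_prefix_single (c : Char) (l : List Char) : [c] <+: l ↔ l.head? = some c := by
  cases l <;> simp [List.prefix_cons_iff, eq_comm]

-- find of a single character = the first index holding it
lemma pv_find_single (v : List Char) (c : Char) (k : Nat) (hk : k < v.length)
    (hc : v[k] = c) (hmin : ∀ j (hj : j < v.length), j < k → v[j] ≠ c) :
    PySem.Chars.find v [c] = (k : Int) := by
  have hmem : c ∈ v := hc ▸ List.getElem_mem hk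
  have h0 : 0 ≤ PySem.Chars.find v [c] :=
    (PySem.Chars.find_nonneg_iff v [c]).mpr ((List.singleton_infix_iff c v).mpr hmem)
  obtain ⟨hpre, hminf⟩ := PySem.Chars.find_spec (s := v) (sub := [c]) h0
  set f := (PySem.Chars.find v [c]).toNat with hf
  have hks : [c] <+: v.drop k := by
    rw [pv_prefix_single, List.head?_drop, List.getElem?_eq_getElem hk, hc]
  have hfk : f ≤ k := by
    by_contra h
    exact hminf k (by omega) hks
  have hflt : f < v.length := lt_of_le_of_lt hfk hk
  have hfc : v[f] = c := by
    rw [pv_prefix_single, List.head?_drop, List.getElem?_eq_getElem hflt] at hpre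
    exact Option.some_injective _ hpre
  have h1 : ¬ f < k := fun h => hmin f hflt h hfc
  have h2 : f = k := by omega
  omega

-- the list of single-character slices, reversed and joined, is the reverse
lemma pv_map_range_slice (l : List Char) :
    (List.range l.length).map (fun (k : Nat) => PySem.List.slice l (some (k : Int)) (some ((k : Int) + 1)))
      = l.map (fun c => [c]) := by
  apply List.ext_getElem (by simp)
  intro k h1 h2
  simp only [List.getElem_map, List.getElem_range]
  have hk : k < l.length := by simpa using h1
  rw [PySem.List.slice_toNat l (by omega) (by omega)]
  have h3 : ((k : Int) + 1).toNat = k + 1 := by omega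
  have h4 : k + 1 - k = 1 := by omega
  rw [h3, Int.toNat_natCast, h4, List.take_one, List.head?_drop, List.getElem?_eq_getElem hk]
  rfl

-- regle_1 reverses
lemma pv_regle_1_toList (x : String) : (regle_1 x).toList = x.toList.reverse := by
  unfold regle_1
  rw [PySem.Str.toList_join]
  have hlen : PySem.Str.len x = (x.toList.length : Int) := by simp
  rw [hlen, PySem.List.pyRange_one]
  simp only [sub_zero, Int.toNat_natCast, zero_add]
  rw [List.map_reverse, List.map_map, List.map_map]
  have h1 : (String.toList ∘ fun i : Int => PySem.Str.slice x (some i) (some (i + 1))) ∘ (fun k : Nat => (k : Int))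
      = fun (k : Nat) => PySem.List.slice x.toList (some (k : Int)) (some ((k : Int) + 1)) := by
    funext k; simp [PySem.Str.toList_slice]
  rw [h1, pv_map_range_slice, ← List.map_reverse]
  exact PySem.Chars.join_nil_singletons _

-- basic facts about pvVoyelle and pvMark
lemma pv_voy_ne_dollar {c : Char} (h : c ∈ pvVoyelle) : c ≠ '$' := by
  fin_cases h <;> decide

lemma pv_mark_ne_vowel {x c : Char} (hc : c ∈ pvVoyelle) : pvMark x ≠ c := by
  unfold pvMark
  split_ifs with hx
  · exact fun h => pv_voy_ne_dollar hc h.symm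
  · exact fun h => hx (h ▸ hc)

lemma pv_mark_eq_dollar_iff (c : Char) : pvMark c = '$' ↔ (c = '$' ∨ c ∈ pvVoyelle) := by
  unfold pvMark
  split_ifs with hx <;> simp [hx]

-- invariant of A's first loop: after the first k indices, the first k characters are
-- marked and the vowels seen so far are collected
lemma pv_extract_inv (v : String) (k : Nat) (hk : k ≤ v.toList.length) :
    ((PySem.List.pyRange 0 (k : Int) 1).foldl
      (fun st i =>
        match PySem.Str.pyGet? st.1 i with
        | none => st
        | some c =>
          if c ∉ pvVoyelle then st
          else
            let indice := PySem.Str.find st.1 (String.ofList [c])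
            (PySem.Str.slice st.1 none (some indice) ++ "$" ++
               PySem.Str.slice st.1 (some (indice + 1)) none,
             st.2 ++ String.ofList [c]))
      (v, "")).1.toList = (v.toList.take k).map pvMark ++ v.toList.drop k ∧
    ((PySem.List.pyRange 0 (k : Int) 1).foldl
      (fun st i =>
        match PySem.Str.pyGet? st.1 i with
        | none => st
        | some c =>
          if c ∉ pvVoyelle then st
          else
            let indice := PySem.Str.find st.1 (String.ofList [c])
            (PySem.Str.slice st.1 none (some indice) ++ "$" ++
               PySem.Str.slice st.1 (some (indice + 1)) none,
             st.2 ++ String.ofList [c]))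
      (v, "")).2.toList = (v.toList.take k).filter (fun c => c ∈ pvVoyelle) := by
  induction k with
  | zero =>
    rw [show ((0 : Nat) : Int) = 0 from rfl, PySem.List.pyRange_one_eq_nil (a := 0) (b := 0) le_rfl]
    simp
  | succ k ih =>
    obtain ⟨ih1, ih2⟩ := ih (by omega)
    have hklt : k < v.toList.length := by omega
    have hcast : ((k + 1 : Nat) : Int) = (k : Int) + 1 := by push_cast; ring
    rw [hcast, PySem.List.pyRange_one_succ_right (a := 0) (b := (k : Int)) (by omega), List.foldl_append]
    set st := ((PySem.List.pyRange 0 (k : Int) 1).foldl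
      (fun st i =>
        match PySem.Str.pyGet? st.1 i with
        | none => st
        | some c =>
          if c ∉ pvVoyelle then st
          else
            let indice := PySem.Str.find st.1 (String.ofList [c])
            (PySem.Str.slice st.1 none (some indice) ++ "$" ++
               PySem.Str.slice st.1 (some (indice + 1)) none,
             st.2 ++ String.ofList [c]))
      (v, "")) with hst
    have hlA : ((v.toList.take k).map pvMark).length = k := by
      rw [List.length_map, List.length_take]; omega
    have hget : PySem.Str.pyGet? st.1 (k : Int) = some v.toList[k] := by
      rw [PySem.Str.pyGet?_natCast, ih1, List.getElem?_append_right (by omega), hlA]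
      simp [List.getElem?_drop]
    simp only [List.foldl_cons, List.foldl_nil, hget]
    have htake : v.toList.take (k + 1) = v.toList.take k ++ [v.toList[k]] :=
      List.take_succ_eq_append_getElem hklt
    by_cases hv : v.toList[k] ∈ pvVoyelle
    · simp only [hv, not_true_eq_false, if_false]
      have hfind : PySem.Str.find st.1 (String.ofList [v.toList[k]]) = (k : Int) := by
        rw [PySem.Str.find_eq, String.toList_ofList, ih1]
        have hlen2 : ((v.toList.take k).map pvMark ++ v.toList.drop k).length
            = v.toList.length := by
          rw [List.length_append, List.length_map, List.length_take, List.length_drop]; omega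
        refine pv_find_single _ _ k (by rw [hlen2]; exact hklt) ?_ ?_
        · rw [List.getElem_append_right (by omega)]
          simp only [hlA, List.getElem_drop]
          congr 1
          omega
        · intro j hj hjk
          rw [List.getElem_append_left (by omega)]
          simp only [List.getElem_map]
          exact pv_mark_ne_vowel hv
      have hmk : pvMark v.toList[k] = '$' := (pv_mark_eq_dollar_iff _).mpr (Or.inr hv)
      constructor
      · simp only [String.toList_append, PySem.Str.toList_slice, hfind,
          PySem.Chars.slice_eq_listSlice, ih1]
        rw [PySem.List.slice_to _ (by omega), PySem.List.slice_from _ (by omega)]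
        have h1 : ((k : Int)).toNat = k := by omega
        have h2 : ((k : Int) + 1).toNat = k + 1 := by omega
        have e1 := List.take_left (l₁ := (v.toList.take k).map pvMark) (l₂ := v.toList.drop k)
        have e2 := List.drop_length_add_append (l₁ := (v.toList.take k).map pvMark)
          (l₂ := v.toList.drop k) 1
        rw [hlA] at e1 e2
        rw [h1, h2, e1, e2, List.drop_eq_getElem_cons hklt, htake, List.map_append,
          show "$".toList = ['$'] from rfl]
        simp [hmk]
      · rw [String.toList_append, String.toList_ofList, ih2, htake, List.filter_append]
        simp [hv]
    · simp only [hv, not_false_eq_true, if_true]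
      have hmk : pvMark v.toList[k] = v.toList[k] := by
        unfold pvMark; simp [hv]
      refine ⟨?_, ?_⟩
      · rw [ih1, htake, List.map_append, List.drop_eq_getElem_cons hklt]
        simp [hmk]
      · rw [ih2, htake, List.filter_append]
        simp [hv]

-- what A's first loop computes
lemma pv_extract_eq (v : String) :
    (pvExtract v).1.toList = v.toList.map pvMark ∧
    (pvExtract v).2.toList = v.toList.filter (fun c => c ∈ pvVoyelle) := by
  unfold pvExtract
  have hlen : PySem.Str.len v = (v.toList.length : Int) := by simp
  rw [hlen]
  obtain ⟨h1, h2⟩ := pv_extract_inv v v.toList.length le_rfl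
  rw [h1, h2, List.take_length, List.drop_length, List.append_nil]
  exact ⟨rfl, rfl⟩

-- A's second loop at list level
lemma pv_reinsert_aux (cs : List Char) (val : String) :
    (cs.foldl
      (fun v ch =>
        let indice := PySem.Str.find v "$"
        PySem.Str.slice v none (some indice) ++ String.ofList [ch] ++
          PySem.Str.slice v (some (indice + 1)) none)
      val).toList = cs.foldl pvRpl val.toList := by
  induction cs generalizing val with
  | nil => rfl
  | cons c cs ih =>
    simp only [List.foldl_cons]
    rw [ih]
    congr 1
    simp only [pvRpl, String.toList_append, PySem.Str.toList_slice, PySem.Chars.slice_eq_listSlice,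
      PySem.Str.find_eq, String.toList_ofList, show "$".toList = ['$'] from rfl]

lemma pv_reinsert_toList (vv val : String) :
    (pvReinsert val vv).toList = vv.toList.foldl pvRpl val.toList := by
  unfold pvReinsert
  exact pv_reinsert_aux vv.toList val

-- the first '$' of a list containing one, through Chars.find
lemma pv_first_dollar (m : List Char) (hm : '$' ∈ m) :
    ∃ j : Nat, PySem.Chars.find m ['$'] = (j : Int) ∧
      ∃ h : j < m.length, m[j] = '$' ∧ ∀ i (hi : i < m.length), i < j → m[i] ≠ '$' := by
  have h0 : 0 ≤ PySem.Chars.find m ['$'] :=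
    (PySem.Chars.find_nonneg_iff m ['$']).mpr ((List.singleton_infix_iff '$' m).mpr hm)
  obtain ⟨hpre, hminf⟩ := PySem.Chars.find_spec (s := m) (sub := ['$']) h0
  set j := (PySem.Chars.find m ['$']).toNat with hj
  rw [pv_prefix_single, List.head?_drop] at hpre
  have hjlt : j < m.length := by
    by_contra h
    rw [List.getElem?_eq_none_iff.mpr (by omega)] at hpre
    simp at hpre
  refine ⟨j, by omega, hjlt, ?_, ?_⟩
  · rw [List.getElem?_eq_getElem hjlt] at hpre
    exact Option.some_injective _ hpre
  · intro i hi hij hc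
    exact hminf i hij (by rw [pv_prefix_single, List.head?_drop, List.getElem?_eq_getElem hi, hc])

-- pvRpl replaces the first '$'
lemma pv_rpl_eq (m : List Char) (c : Char) (j : Nat) (hj : j < m.length) (hc : m[j] = '$')
    (hmin : ∀ i (hi : i < m.length), i < j → m[i] ≠ '$') :
    pvRpl m c = m.take j ++ c :: m.drop (j + 1) := by
  have hf : PySem.Chars.find m ['$'] = (j : Int) := pv_find_single m '$' j hj hc hmin
  simp only [pvRpl, hf]
  rw [PySem.List.slice_to _ (by omega), PySem.List.slice_from _ (by omega)]
  have h1 : ((j : Int)).toNat = j := by omega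
  have h2 : ((j : Int) + 1).toNat = j + 1 := by omega
  rw [h1, h2]
  simp

lemma pv_rpl_cons (x : Char) (m : List Char) (c : Char) (hx : x ≠ '$') (hm : '$' ∈ m) :
    pvRpl (x :: m) c = x :: pvRpl m c := by
  obtain ⟨j, hfind, hjlt, hgj, hminj⟩ := pv_first_dollar m hm
  rw [pv_rpl_eq m c j hjlt hgj hminj]
  have hgj' : (x :: m)[j + 1]'(by simpa using hjlt) = '$' := by simpa using hgj
  have hminj' : ∀ i (hi : i < (x :: m).length), i < j + 1 → (x :: m)[i] ≠ '$' := by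
    intro i hi hij
    cases i with
    | zero => simpa using hx
    | succ i => simpa using hminj i (by simpa using hi) (by omega)
  rw [pv_rpl_eq (x :: m) c (j + 1) (by simpa using hjlt) hgj' hminj']
  simp

-- replacing the first '$' with a non-'$' character lowers the '$'-count by one
lemma pv_count_rpl (m : List Char) (c : Char) (hc : c ≠ '$') (hm : '$' ∈ m) :
    (pvRpl m c).count '$' + 1 = m.count '$' := by
  obtain ⟨j, hfind, hjlt, hgj, hminj⟩ := pv_first_dollar m hm
  rw [pv_rpl_eq m c j hjlt hgj hminj]
  have hm' : m = m.take j ++ '$' :: m.drop (j + 1) := by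
    conv_lhs => rw [← List.take_append_drop j m]
    rw [List.drop_eq_getElem_cons hjlt, hgj]
  conv_rhs => rw [hm']
  simp [List.count_append, hc]
  omega

-- unfolding equations for pvFill
lemma pv_fill_cons_slot (c x : Char) (s q : List Char) (h : c = '$' ∨ c ∈ pvVoyelle) :
    pvFill (c :: s) (x :: q) = x :: pvFill s q := by
  simp only [pvFill]
  rw [if_pos h]

lemma pv_fill_cons_skip (c : Char) (s q : List Char) (h : ¬(c = '$' ∨ c ∈ pvVoyelle)) :
    pvFill (c :: s) q = c :: pvFill s q := by
  simp only [pvFill]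
  rw [if_neg h]

-- skipping a non-'$' head commutes with the reinsertion fold
lemma pv_foldl_rpl_cons (cs : List Char) (x : Char) (m : List Char)
    (hx : x ≠ '$') (hlen : cs.length ≤ m.count '$') (hcs : ∀ y ∈ cs, y ≠ '$') :
    cs.foldl pvRpl (x :: m) = x :: cs.foldl pvRpl m := by
  induction cs generalizing m with
  | nil => rfl
  | cons c cs ih =>
    have hm : '$' ∈ m := by
      have : 0 < m.count '$' := by simp at hlen; omega
      exact List.count_pos_iff.mp this
    have hc : c ≠ '$' := hcs c (by simp)
    simp only [List.foldl_cons]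
    rw [pv_rpl_cons x m c hx hm]
    apply ih
    · have := pv_count_rpl m c hc hm
      simp at hlen
      omega
    · intro y hy; exact hcs y (by simp [hy])

-- the main correspondence: A's mark-then-refill = a single slot-filling pass
lemma pv_fold_eq_fill (s cs : List Char) (hlen : cs.length ≤ (s.map pvMark).count '$')
    (hcs : ∀ y ∈ cs, y ≠ '$') :
    cs.foldl pvRpl (s.map pvMark)
      = pvFill s (cs ++ List.replicate ((s.map pvMark).count '$' - cs.length) '$') := by
  induction s generalizing cs with
  | nil =>
    have : cs = [] := List.length_eq_zero_iff.mp (by simpa using hlen)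
    subst this
    rfl
  | cons a s' ih =>
    by_cases hslot : a = '$' ∨ a ∈ pvVoyelle
    · have hmark : pvMark a = '$' := (pv_mark_eq_dollar_iff a).mpr hslot
      have hcount : ((a :: s').map pvMark).count '$' = (s'.map pvMark).count '$' + 1 := by
        simp [hmark]
      cases cs with
      | nil =>
        have h0 := ih [] (by simp) (by simp)
        simp only [List.foldl_nil, List.length_nil, Nat.sub_zero, List.nil_append] at h0 ⊢
        rw [List.map_cons, hmark, List.count_cons_self, List.replicate_succ,
          pv_fill_cons_slot a '$' s' _ hslot, ← h0]
      | cons x cs' =>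
        have hx : x ≠ '$' := hcs x (by simp)
        have hlen' : cs'.length ≤ (s'.map pvMark).count '$' := by
          rw [hcount] at hlen; simp at hlen; omega
        have hcs' : ∀ y ∈ cs', y ≠ '$' := fun y hy => hcs y (by simp [hy])
        simp only [List.map_cons, hmark, List.foldl_cons]
        have hrpl0 : pvRpl ('$' :: s'.map pvMark) x = x :: s'.map pvMark := by
          rw [pv_rpl_eq ('$' :: s'.map pvMark) x 0 (by simp) (by simp) (by omega)]
          simp
        rw [hrpl0, pv_foldl_rpl_cons cs' x (s'.map pvMark) hx hlen' hcs', ih cs' hlen' hcs']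
        rw [List.cons_append, pv_fill_cons_slot a x s' _ hslot]
        simp only [List.count_cons_self, List.length_cons, Nat.add_sub_add_right]
    · have ha : a ≠ '$' := fun h => hslot (Or.inl h)
      have hnv : a ∉ pvVoyelle := fun h => hslot (Or.inr h)
      have hmark : pvMark a = a := by unfold pvMark; simp [hnv]
      have hcount : ((a :: s').map pvMark).count '$' = (s'.map pvMark).count '$' := by
        simp [hmark, List.count_cons_of_ne ha]
      rw [hcount] at hlen ⊢
      simp only [List.map_cons, hmark]
      rw [pv_foldl_rpl_cons cs a (s'.map pvMark) ha hlen hcs, ih cs hlen hcs,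
        pv_fill_cons_skip a s' _ hslot]

-- counting the '$' marks: one per vowel plus the original '$' characters
lemma pv_count_mark (l : List Char) :
    (l.map pvMark).count '$'
      = (l.filter (fun c => c ∈ pvVoyelle)).length + l.count '$' := by
  induction l with
  | nil => simp
  | cons a l ih =>
    by_cases ha : a ∈ pvVoyelle
    · have h1 : pvMark a = '$' := (pv_mark_eq_dollar_iff a).mpr (Or.inr ha)
      have h2 : a ≠ '$' := pv_voy_ne_dollar ha
      have h2' : ¬('$' = a) := fun h => h2 h.symm
      simp [h1, ha, h2, ih]
      omega
    · have h1 : pvMark a = a := by unfold pvMark; simp [ha]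
      by_cases h2 : a = '$'
      · subst h2; simp [h1, ha, ih]; omega
      · have h2' : ¬('$' = a) := fun h => h2 h.symm
        simp [h1, ha, List.count_cons, ih]
        omega

-- on a '$'-free string the slot fill and B's vowel fill coincide
lemma pv_fill_eq_fillB (s : List Char) (hnd : '$' ∉ s) (q : List Char) :
    pvFill s q = pvFillB s q := by
  induction s generalizing q with
  | nil => rfl
  | cons a s' ih =>
    have ha : a ≠ '$' := fun h => hnd (h ▸ List.mem_cons_self)
    have hnd' : '$' ∉ s' := fun h => hnd (List.mem_cons_of_mem _ h)
    by_cases hv : a ∈ pvVoyelle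
    · cases q with
      | nil =>
        simp only [pvFill, pvFillB]
        rw [if_pos (Or.inr hv), if_pos hv]
        exact congrArg _ (ih hnd' [])
      | cons x q' =>
        simp only [pvFill, pvFillB]
        rw [if_pos (Or.inr hv), if_pos hv]
        exact congrArg _ (ih hnd' q')
    · simp only [pvFill, pvFillB]
      rw [if_neg (by tauto), if_neg hv]
      exact congrArg _ (ih hnd' q)

-- A's extract-then-reinsert equals B's one-pass fill (on a '$'-free input)
lemma pv_reinsert_fill (val vv : String)
    (hnd : '$' ∉ val.toList)
    (hvv : ∀ y ∈ vv.toList, y ∈ pvVoyelle)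
    (hlen : vv.toList.length = (val.toList.filter (fun c => c ∈ pvVoyelle)).length) :
    (pvReinsert (pvExtract val).1 vv).toList = pvFillB val.toList vv.toList := by
  rw [pv_reinsert_toList, (pv_extract_eq val).1]
  have hcnt := pv_count_mark val.toList
  have hc0 : val.toList.count '$' = 0 := List.count_eq_zero.mpr hnd
  have hne : ∀ y ∈ vv.toList, y ≠ '$' := fun y hy => pv_voy_ne_dollar (hvv y hy)
  rw [pv_fold_eq_fill _ _ (by omega) hne]
  have harith : (val.toList.map pvMark).count '$' - vv.toList.length = 0 := by omega
  rw [harith, List.replicate_zero, List.append_nil]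
  exact pv_fill_eq_fillB val.toList hnd vv.toList

-- String equality from list equality
lemma pv_str_eq_ofList (a : String) (l : List Char) (h : a.toList = l) : a = String.ofList l := by
  rw [← h, String.ofList_toList]

-- regle_2's body for an arbitrary string, as a function of its character list
lemma pv_regle2_body (r : String) (t : List Char) (hr : r.toList = t) :
    (if PySem.Int.mod (PySem.Str.len r) 2 == 0 then
       PySem.Str.slice r (some (PySem.Int.floordiv (PySem.Str.len r) 2)) (some (PySem.Str.len r))
         ++ PySem.Str.slice r (some 0) (some (PySem.Int.floordiv (PySem.Str.len r) 2))
     else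
       PySem.Str.replace r
         (String.ofList [(PySem.Str.pyGet? r (PySem.Int.floordiv (PySem.Str.len r) 2)).getD ' ']) "")
    = (if t.length % 2 == 0 then
        String.ofList (t.drop (t.length / 2) ++ t.take (t.length / 2))
      else
        PySem.Str.replace (String.ofList t) (String.ofList [t[t.length / 2]?.getD ' ']) "") := by
  have hn : PySem.Str.len r = (t.length : Int) := by simp [← hr]
  have hmod : PySem.Int.mod (PySem.Str.len r) 2 = ((t.length % 2 : Nat) : Int) := by
    rw [hn, show (2 : Int) = ((2 : Nat) : Int) from rfl, PySem.Int.mod_natCast]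
  have hdiv : PySem.Int.floordiv (PySem.Str.len r) 2 = ((t.length / 2 : Nat) : Int) := by
    rw [hn, show (2 : Int) = ((2 : Nat) : Int) from rfl, PySem.Int.floordiv_natCast]
  have hdiv2 : PySem.Int.floordiv ((t.length : Nat) : Int) 2 = ((t.length / 2 : Nat) : Int) := by
    rw [show (2 : Int) = ((2 : Nat) : Int) from rfl, PySem.Int.floordiv_natCast]
  by_cases hpar : t.length % 2 = 0
  · rw [if_pos (by rw [hmod, hpar]; rfl), if_pos (by rw [hpar]; rfl)]
    apply pv_str_eq_ofList
    rw [String.toList_append, PySem.Str.toList_slice, PySem.Str.toList_slice]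
    simp only [PySem.Chars.slice_eq_listSlice, hr, hdiv2, hn]
    rw [PySem.List.slice_zero_start, PySem.List.slice_to _ (by omega),
      PySem.List.slice_toNat _ (by omega) (by omega)]
    simp only [Int.toNat_natCast]
    congr 1
    rw [← List.length_drop]
    exact List.take_length
  · have hpar1 : t.length % 2 = 1 := by omega
    rw [if_neg (by rw [hmod, hpar1]; decide), if_neg (by rw [hpar1]; decide)]
    have hx2 : r = String.ofList t := pv_str_eq_ofList _ _ hr
    have hchar : (PySem.Str.pyGet? r (PySem.Int.floordiv (PySem.Str.len r) 2)).getD ' '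
        = t[t.length / 2]?.getD ' ' := by
      rw [hdiv, PySem.Str.pyGet?_natCast, hr]
    rw [hchar]
    conv_lhs => rw [hx2]

-- the common tail: regle_2 as a function of the reinsertion result's character list
lemma pv_tail (x : String) (u : List Char) (hx : x.toList = u) :
    regle_2 x =
      (if u.reverse.length % 2 == 0 then
        String.ofList (u.reverse.drop (u.reverse.length / 2) ++ u.reverse.take (u.reverse.length / 2))
      else
        PySem.Str.replace (String.ofList u.reverse)
          (String.ofList [u.reverse[u.reverse.length / 2]?.getD ' ']) "") := by
  simp only [regle_2]
  exact pv_regle2_body (regle_1 x) u.reverse (by rw [pv_regle_1_toList, hx])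

-- rotations keep the length
lemma pv_rot1_len (V : List Char) :
    (PySem.List.slice V (some 1) none ++ PySem.List.slice V none (some 1)).length = V.length := by
  rw [PySem.List.slice_from_one, PySem.List.slice_to _ (by omega)]
  cases V <;> simp

lemma pv_rotm1_len (V : List Char) :
    (PySem.List.slice V (some (-1)) none ++ PySem.List.slice V none (some (-1))).length
      = V.length := by
  rw [PySem.List.slice_from_neg_one, PySem.List.slice_to_neg_one]
  cases V with
  | nil => simp
  | cons a t => simp [List.length_dropLast]; omega

-- membership in a pair of slices
lemma pv_mem_slice_append {V : List Char} {a1 b1 a2 b2 : Option Int} {y : Char}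
    (h : y ∈ PySem.List.slice V a1 b1 ++ PySem.List.slice V a2 b2) : y ∈ V := by
  rcases List.mem_append.mp h with h | h <;> exact PySem.List.mem_of_mem_slice _ _ _ h

-- one branch of regle_3 against one branch of regle_3_alt
lemma pv_branch (val vv : String) (rot : List Char)
    (hnd : '$' ∉ val.toList)
    (hvvl : vv.toList = rot)
    (hmem : ∀ y ∈ rot, y ∈ pvVoyelle)
    (hrlen : rot.length = (val.toList.filter (fun c => c ∈ pvVoyelle)).length) :
    regle_2 (pvReinsert (pvExtract val).1 vv)
      = (if ((pvFillB val.toList rot).reverse.length % 2 == 0) then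
          String.ofList ((pvFillB val.toList rot).reverse.drop
              ((pvFillB val.toList rot).reverse.length / 2)
            ++ (pvFillB val.toList rot).reverse.take
              ((pvFillB val.toList rot).reverse.length / 2))
        else
          PySem.Str.replace (String.ofList (pvFillB val.toList rot).reverse)
            (String.ofList [(pvFillB val.toList rot).reverse[
              (pvFillB val.toList rot).reverse.length / 2]?.getD ' ']) "") := by
  have hXl : (pvReinsert (pvExtract val).1 vv).toList = pvFillB val.toList rot := by
    rw [← hvvl] at hrlen ⊢
    exact pv_reinsert_fill val vv hnd (fun y hy => hmem y (hvvl ▸ hy)) hrlen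
  exact pv_tail _ _ hXl

-- ===== VERDICT =====
theorem regle_3_spec : Claim_equal_regle_3 := by
  intro val _ hpre
  unfold Spec_regle_3
  unfold Pre_regle_3 at hpre
  simp only [regle_3, regle_3_alt]
  have hlen : PySem.Str.len val = (val.toList.length : Int) := by simp
  by_cases h3 : val.toList.length < 3
  · rw [if_neg (by rw [hlen]; omega), if_pos h3]
  · rw [if_pos (by rw [hlen]; omega), if_neg h3]
    have h2lt : 2 < val.toList.length := by omega
    have hget2 : PySem.Str.pyGet? val (2 : Int) = some val.toList[2] := by
      rw [show (2 : Int) = ((2 : Nat) : Int) from rfl, PySem.Str.pyGet?_natCast,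
        List.getElem?_eq_getElem h2lt]
    have hget2' : val.toList[2]?.getD ' ' = val.toList[2] := by
      rw [List.getElem?_eq_getElem h2lt]; rfl
    simp only [hget2, hget2', Option.getD_some]
    set V := val.toList.filter (fun c => c ∈ pvVoyelle) with hV
    have hV2 : (pvExtract val).2.toList = V := (pv_extract_eq val).2
    by_cases hv2 : val.toList[2] ∈ pvVoyelle
    · rw [if_neg (by simp [hv2]), if_pos hv2]
      apply pv_branch _ _ _ hpre
      · rw [String.toList_append, PySem.Str.toList_slice, PySem.Str.toList_slice]
        simp only [PySem.Chars.slice_eq_listSlice, hV2]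
      · intro y hy
        have hmem := pv_mem_slice_append hy
        rw [hV, List.mem_filter] at hmem
        exact of_decide_eq_true hmem.2
      · exact pv_rotm1_len V
    · rw [if_pos (by simp [hv2]), if_neg hv2]
      apply pv_branch _ _ _ hpre
      · rw [String.toList_append, PySem.Str.toList_slice, PySem.Str.toList_slice]
        simp only [PySem.Chars.slice_eq_listSlice, hV2]
      · intro y hy
        have hmem := pv_mem_slice_append hy
        rw [hV, List.mem_filter] at hmem
        exact of_decide_eq_true hmem.2
      · exact pv_rot1_len V
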